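-- pv_equiv track=rewrite | github.com/sjw787/argus | src/argus/api/routers/queries.py | _is_select
-- ===== SOURCE A (Python) =====
-- def _is_select(sql: str) -> bool:
--     """Return True if the statement (ignoring leading comments/whitespace) is a SELECT."""
--     i = 0
--     n = len(sql)
--     while i < n:
--         c = sql[i]
--         if c in (' ', '\t', '\n', '\r'):
--             i += 1
--             continue
--         if c == '-' and i + 1 < n and sql[i + 1] == '-':
--             while i < n and sql[i] != '\n':
--                 i += 1
--             continue
--         if c == '/' and i + 1 < n and sql[i + 1] == '*':
--             i += 2
--             while i < n - 1 and not (sql[i] == '*' and sql[i + 1] == '/'):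
--                 i += 1
--             i += 2
--             continue
--         # First real token — check for SELECT or WITH (CTE)
--         token = sql[i:i + 6].upper()
--         return token.startswith('SELECT') or token.startswith('WITH')
--     return False
-- ===== SOURCE B (Python) =====
-- def _is_select(sql: str) -> bool:
--     """Return True if the statement (ignoring leading comments/whitespace) is a SELECT."""
--     s = sql.lstrip(' \t\n\r')
--     if s.startswith('--'):
--         nl = s.find('\n')
--         return False if nl == -1 else _is_select(s[nl:])
--     if s.startswith('/*'):
--         end = s.find('*/', 2)
--         return False if end == -1 else _is_select(s[end + 2:])
--     head = s[:6].upper()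
--     return head.startswith('SELECT') or head.startswith('WITH')
-- ===== Notes on version B (the rewrite author's own statement) =====
-- stated objective: simpler
-- what changed: Replaced the hand-rolled index-based character scanner (three nested while loops over a cursor) by a short recursive function over string suffixes using lstrip/startswith/find/slicing to strip one leading comment per step.
import Mathlib
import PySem

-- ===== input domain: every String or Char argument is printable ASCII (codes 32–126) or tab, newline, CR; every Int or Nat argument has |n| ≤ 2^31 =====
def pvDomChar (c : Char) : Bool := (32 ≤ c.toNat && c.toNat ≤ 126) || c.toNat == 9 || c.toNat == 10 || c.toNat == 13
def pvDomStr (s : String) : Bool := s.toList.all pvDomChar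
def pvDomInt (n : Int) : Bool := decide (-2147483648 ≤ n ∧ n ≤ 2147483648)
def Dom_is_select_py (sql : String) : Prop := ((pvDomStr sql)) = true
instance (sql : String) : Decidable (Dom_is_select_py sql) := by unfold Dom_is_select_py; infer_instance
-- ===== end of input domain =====

-- B is simpler: A's index-cursor scanner (an outer while with two nested inner while loops) is
-- replaced by a short recursion over string suffixes using lstrip/startswith/find/slicing.

-- ===== PORT A =====
-- A's inner loop `while i < n and sql[i] != '\n': i += 1`
def pvASkipLine (s : List Char) (i : Nat) : Nat :=
  if h : i < s.length then
    if s[i] = '\n' then i else pvASkipLine s (i + 1)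
  else i
termination_by s.length - i

-- A's inner loop `while i < n - 1 and not (sql[i] == '*' and sql[i+1] == '/'): i += 1`
-- (Python's `i < n - 1` on ints is `i + 1 < n`)
def pvASkipBlock (s : List Char) (i : Nat) : Nat :=
  if h : i + 1 < s.length then
    if s[i] = '*' ∧ s[i + 1] = '/' then i else pvASkipBlock s (i + 1)
  else i
termination_by s.length - i

-- (used by pvALoop's decreasing_by)
theorem pvASkipLine_ge (s : List Char) (i : Nat) : i ≤ pvASkipLine s i := by
  fun_induction pvASkipLine <;> omega

theorem pvASkipBlock_ge (s : List Char) (i : Nat) : i ≤ pvASkipBlock s i := by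
  fun_induction pvASkipBlock <;> omega

-- A's outer `while i < n` loop; the state is the cursor i, branches in A's order
def pvALoop (s : List Char) (i : Nat) : Bool :=
  if h : i < s.length then
    if hw : s[i] = ' ' ∨ s[i] = '\t' ∨ s[i] = '\n' ∨ s[i] = '\r' then
      pvALoop s (i + 1)
    else if hd : s[i] = '-' ∧ i + 1 < s.length ∧ s[i + 1]? = some '-' then
      pvALoop s (pvASkipLine s i)
    else if hb : s[i] = '/' ∧ i + 1 < s.length ∧ s[i + 1]? = some '*' then
      pvALoop s (pvASkipBlock s (i + 2) + 2)
    else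
      -- token = sql[i:i+6].upper(); token.startswith('SELECT') or token.startswith('WITH')
      let token := PySem.Chars.upper (PySem.List.slice s (some (i : Int)) (some ((i : Int) + 6)))
      PySem.Chars.startswith token "SELECT".toList || PySem.Chars.startswith token "WITH".toList
  else false
termination_by s.length - i
decreasing_by
  · omega
  · have h1 : i ≤ pvASkipLine s i := pvASkipLine_ge s i
    have h2 : pvASkipLine s i ≠ i := by
      rw [pvASkipLine]
      rw [dif_pos h, if_neg (by simp [hd.1])]
      have := pvASkipLine_ge s (i + 1); omega
    omega
  · have := pvASkipBlock_ge s (i + 2); omega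

def is_select_py (sql : String) : Bool := pvALoop sql.toList 0

-- ===== PORT B =====
def pvWs (c : Char) : Bool := c == ' ' || c == '\t' || c == '\n' || c == '\r'

-- (used by pvBGo's decreasing_by)
theorem pv_prefix1 (u : List Char) (a : Char) : [a] <+: u ↔ u[0]? = some a := by
  cases u <;> simp [List.cons_prefix_cons, eq_comm]

theorem pv_prefix2 (u : List Char) (a b : Char) : [a, b] <+: u ↔ u[0]? = some a ∧ u[1]? = some b := by
  match u with
  | [] => simp
  | [c] => simp [List.cons_prefix_cons]
  | c :: d :: r => simp [List.cons_prefix_cons, eq_comm]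

-- recursion over suffixes; `sql.lstrip(' \t\n\r')` is ported by hand as dropWhile over exactly
-- that char set (exact: lstrip removes the longest leading run of chars from the set)
def pvBGo (s : List Char) : Bool :=
  let t := s.dropWhile pvWs
  if h1 : PySem.Chars.startswith t ['-', '-'] then
    let nl := PySem.Chars.find t ['\n']
    if h2 : nl = -1 then false else pvBGo (PySem.List.slice t (some nl) none)
  else if h3 : PySem.Chars.startswith t ['/', '*'] then
    let e := PySem.Chars.findFrom t ['*', '/'] 2 none
    if h4 : e = -1 then false else pvBGo (PySem.List.slice t (some (e + 2)) none)
  else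
    let head := PySem.Chars.upper (PySem.List.slice t none (some 6))
    PySem.Chars.startswith head "SELECT".toList || PySem.Chars.startswith head "WITH".toList
termination_by s.length
decreasing_by
  · -- line-comment step: the slice drops at least the leading "--"
    have hst := (PySem.Chars.startswith_iff _ _).mp h1
    have h0 : t[0]? = some '-' ∧ t[1]? = some '-' := (pv_prefix2 t '-' '-').mp hst
    have hlen : 1 < t.length := (List.getElem?_eq_some_iff.mp h0.2).1
    have hnl0 : 0 ≤ PySem.Chars.find t ['\n'] := by
      have := PySem.Chars.neg_one_le_find t ['\n']; omega
    have hsp := PySem.Chars.find_spec hnl0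
    have hpos : 1 ≤ (PySem.Chars.find t ['\n']).toNat := by
      by_contra hc
      have h00 : (PySem.Chars.find t ['\n']).toNat = 0 := by omega
      have := (pv_prefix1 _ _).mp (h00 ▸ hsp.1)
      simp at this
      rw [this] at h0
      simp at h0
    rw [PySem.List.slice_from t hnl0]
    have htle : t.length ≤ s.length := (List.dropWhile_suffix pvWs).length_le
    simp only [List.length_drop]
    omega
  · -- block-comment step: the slice drops at least the leading "/*" and two more chars
    have hst := (PySem.Chars.startswith_iff _ _).mp h3
    have h0 : t[0]? = some '/' ∧ t[1]? = some '*' := (pv_prefix2 t '/' '*').mp hst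
    have hlen : 1 < t.length := (List.getElem?_eq_some_iff.mp h0.2).1
    have hk : (2 : Nat) ≤ t.length := by omega
    have hff := PySem.Chars.findFrom_natCast t ['*', '/'] 2 hk
    have hcast : ((2 : Nat) : Int) = (2 : Int) := rfl
    rw [hcast] at hff
    have h4' : ¬ (if PySem.Chars.find (t.drop 2) ['*', '/'] = -1 then (-1 : Int) else 2 + PySem.Chars.find (t.drop 2) ['*', '/']) = -1 := by
      rw [← hff]; exact h4
    have hfind : 0 ≤ PySem.Chars.find (t.drop 2) ['*', '/'] := by
      have := PySem.Chars.neg_one_le_find (t.drop 2) ['*', '/']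
      by_contra hc
      have heq : PySem.Chars.find (t.drop 2) ['*', '/'] = -1 := by omega
      simp [heq] at h4'
    have he : e = 2 + PySem.Chars.find (t.drop 2) ['*', '/'] := by
      show PySem.Chars.findFrom t ['*', '/'] 2 none = _
      rw [hff, if_neg (by omega)]
    have he2 : 0 ≤ e + 2 := by rw [he]; omega
    have he2' : 2 ≤ (e + 2).toNat := by rw [he]; omega
    rw [PySem.List.slice_from t he2]
    have htle : t.length ≤ s.length := (List.dropWhile_suffix pvWs).length_le
    simp only [List.length_drop]
    omega

def is_select_py_alt (sql : String) : Bool := pvBGo sql.toList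

-- ===== PRECONDITION & SPEC =====
def Spec_is_select_py (sql : String) (out : Bool) : Prop := out = is_select_py_alt sql
instance (sql : String) (out : Bool) : Decidable (Spec_is_select_py sql out) := by unfold Spec_is_select_py; infer_instance

-- ===== CLAIM (what is proved, stated in full; the proofs are below) =====
def Claim_equal_is_select_py : Prop := ∀ (sql : String), Dom_is_select_py sql → Spec_is_select_py sql (is_select_py sql)

-- ===== LEMMAS AND PROOFS =====

theorem pvBGo_nil : pvBGo [] = false := by
  rw [pvBGo.eq_def]; decide

theorem pvBGo_cons_ws (c : Char) (r : List Char) (hc : pvWs c = true) :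
    pvBGo (c :: r) = pvBGo r := by
  conv_lhs => rw [pvBGo.eq_def]
  conv_rhs => rw [pvBGo.eq_def]
  rw [List.dropWhile_cons_of_pos hc]

theorem pvBGo_line_none (s t : List Char) (h : s.dropWhile pvWs = t)
    (hsw : PySem.Chars.startswith t ['-', '-'] = true)
    (hnl : PySem.Chars.find t ['\n'] = -1) : pvBGo s = false := by
  rw [pvBGo.eq_def]; simp [h, hsw, hnl]

theorem pvBGo_line_found (s t : List Char) (h : s.dropWhile pvWs = t)
    (hsw : PySem.Chars.startswith t ['-', '-'] = true)
    (hnl : PySem.Chars.find t ['\n'] ≠ -1) :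
    pvBGo s = pvBGo (PySem.List.slice t (some (PySem.Chars.find t ['\n'])) none) := by
  rw [pvBGo.eq_def]; simp [h, hsw, hnl]

theorem pvBGo_block_none (s t : List Char) (h : s.dropWhile pvWs = t)
    (hs1 : PySem.Chars.startswith t ['-', '-'] = false)
    (hs2 : PySem.Chars.startswith t ['/', '*'] = true)
    (hff : PySem.Chars.findFrom t ['*', '/'] 2 none = -1) : pvBGo s = false := by
  rw [pvBGo.eq_def]; simp [h, hs1, hs2, hff]

theorem pvBGo_block_found (s t : List Char) (h : s.dropWhile pvWs = t)
    (hs1 : PySem.Chars.startswith t ['-', '-'] = false)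
    (hs2 : PySem.Chars.startswith t ['/', '*'] = true)
    (hff : PySem.Chars.findFrom t ['*', '/'] 2 none ≠ -1) :
    pvBGo s = pvBGo (PySem.List.slice t (some (PySem.Chars.findFrom t ['*', '/'] 2 none + 2)) none) := by
  rw [pvBGo.eq_def]; simp [h, hs1, hs2, hff]

theorem pvBGo_token (s t : List Char) (h : s.dropWhile pvWs = t)
    (hs1 : PySem.Chars.startswith t ['-', '-'] = false)
    (hs2 : PySem.Chars.startswith t ['/', '*'] = false) :
    pvBGo s = (PySem.Chars.startswith (PySem.Chars.upper (PySem.List.slice t none (some 6))) "SELECT".toList ||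
               PySem.Chars.startswith (PySem.Chars.upper (PySem.List.slice t none (some 6))) "WITH".toList) := by
  rw [pvBGo.eq_def]; simp [h, hs1, hs2]

theorem pvASkipLine_no (s : List Char) (i : Nat)
    (h : ∀ j, i ≤ j → s[j]? ≠ some '\n') : pvASkipLine s i = max i s.length := by
  rw [pvASkipLine]
  by_cases hi : i < s.length
  · rw [dif_pos hi]
    have hne : ¬ s[i] = '\n' := fun he => h i le_rfl (by rw [List.getElem?_eq_getElem hi, he])
    rw [if_neg hne]
    have := pvASkipLine_no s (i + 1) (fun j hj => h j (by omega))
    rw [this]; omega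
  · rw [dif_neg hi]; omega
termination_by s.length - i

theorem pvASkipLine_first (s : List Char) (i m : Nat) (him : i ≤ m) (hm : s[m]? = some '\n')
    (hmin : ∀ j, i ≤ j → j < m → s[j]? ≠ some '\n') : pvASkipLine s i = m := by
  have hmlt : m < s.length := (List.getElem?_eq_some_iff.mp hm).1
  rw [pvASkipLine]
  have hi : i < s.length := by omega
  rw [dif_pos hi]
  by_cases he : s[i] = '\n'
  · rw [if_pos he]
    by_contra hne
    exact hmin i le_rfl (by omega) (by rw [List.getElem?_eq_getElem hi, he])
  · rw [if_neg he]
    have hne : i ≠ m := by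
      intro hh; subst hh
      rw [List.getElem?_eq_getElem hi] at hm
      exact he (Option.some.inj hm)
    exact pvASkipLine_first s (i + 1) m (by omega) hm (fun j hj hjm => hmin j (by omega) hjm)
termination_by m - i

theorem pvASkipBlock_no (s : List Char) (i : Nat)
    (h : ∀ j, i ≤ j → ¬(s[j]? = some '*' ∧ s[j + 1]? = some '/')) :
    pvASkipBlock s i = max i (s.length - 1) := by
  rw [pvASkipBlock]
  by_cases hi : i + 1 < s.length
  · rw [dif_pos hi]
    have hni : ¬ (s[i] = '*' ∧ s[i + 1] = '/') := by
      rintro ⟨ha, hb⟩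
      exact h i le_rfl ⟨by rw [List.getElem?_eq_getElem (by omega), ha],
                        by rw [List.getElem?_eq_getElem hi, hb]⟩
    rw [if_neg hni]
    have := pvASkipBlock_no s (i + 1) (fun j hj => h j (by omega))
    rw [this]; omega
  · rw [dif_neg hi]; omega
termination_by s.length - i

theorem pvASkipBlock_first (s : List Char) (i m : Nat) (him : i ≤ m)
    (h1 : s[m]? = some '*') (h2 : s[m + 1]? = some '/')
    (hmin : ∀ j, i ≤ j → j < m → ¬(s[j]? = some '*' ∧ s[j + 1]? = some '/')) :
    pvASkipBlock s i = m := by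
  have hm1 : m + 1 < s.length := (List.getElem?_eq_some_iff.mp h2).1
  rw [pvASkipBlock]
  have hi : i + 1 < s.length := by omega
  rw [dif_pos hi]
  by_cases hmatch : s[i] = '*' ∧ s[i + 1] = '/'
  · rw [if_pos hmatch]
    by_contra hne
    exact hmin i le_rfl (by omega) ⟨by rw [List.getElem?_eq_getElem (by omega), hmatch.1],
                                     by rw [List.getElem?_eq_getElem hi, hmatch.2]⟩
  · rw [if_neg hmatch]
    have hne : i ≠ m := by
      intro hh; subst hh
      rw [List.getElem?_eq_getElem (by omega : i < s.length)] at h1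
      rw [List.getElem?_eq_getElem hi] at h2
      exact hmatch ⟨Option.some.inj h1, Option.some.inj h2⟩
    exact pvASkipBlock_first s (i + 1) m (by omega) h1 h2 (fun j hj hjm => hmin j (by omega) hjm)
termination_by m - i

theorem pv_find_none (t sub : List Char) :
    PySem.Chars.find t sub = -1 ↔ ∀ j, ¬ sub <+: t.drop j := by
  rw [PySem.Chars.find_eq_neg_one_iff, ← PySem.Chars.isIn_iff_infix,
      ← PySem.Chars.exists_prefix_drop_iff_isIn]
  exact not_exists

theorem pv_main (s : List Char) (i : Nat) : pvALoop s i = pvBGo (s.drop i) := by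
  rw [pvALoop]
  by_cases hi : i < s.length
  · rw [dif_pos hi]
    have hcons : s.drop i = s[i] :: s.drop (i + 1) := List.drop_eq_getElem_cons hi
    by_cases hw : s[i] = ' ' ∨ s[i] = '\t' ∨ s[i] = '\n' ∨ s[i] = '\r'
    · rw [dif_pos hw, hcons, pvBGo_cons_ws s[i] _ (by rcases hw with h | h | h | h <;> simp [pvWs, h])]
      rw [← List.drop_eq_getElem_cons hi] at *
      exact pv_main s (i + 1)
    · rw [dif_neg hw]
      push_neg at hw
      have hwc : pvWs s[i] = false := by simp [pvWs, hw.1, hw.2.1, hw.2.2.1, hw.2.2.2]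
      have hT : (s.drop i).dropWhile pvWs = s.drop i := by
        rw [hcons]; exact List.dropWhile_cons_of_neg (by simp [hwc])
      have hg0 : (s.drop i)[0]? = some s[i] := by
        rw [List.getElem?_drop]; simpa using List.getElem?_eq_getElem hi
      have hg1 : (s.drop i)[1]? = s[i + 1]? := List.getElem?_drop
      by_cases hd : s[i] = '-' ∧ i + 1 < s.length ∧ s[i + 1]? = some '-'
      · rw [dif_pos hd]
        have hsw : PySem.Chars.startswith (s.drop i) ['-', '-'] = true :=
          (PySem.Chars.startswith_iff _ _).mpr ((pv_prefix2 _ _ _).mpr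
            ⟨by rw [hg0, hd.1], by rw [hg1]; exact hd.2.2⟩)
        by_cases hnl : PySem.Chars.find (s.drop i) ['\n'] = -1
        · rw [pvBGo_line_none (s.drop i) (s.drop i) hT hsw hnl]
          have hno : ∀ j, i ≤ j → s[j]? ≠ some '\n' := by
            intro j hj hj2
            apply (pv_find_none _ _).mp hnl (j - i)
            have hdd : (s.drop i).drop (j - i) = s.drop j := by
              rw [List.drop_drop]; try (congr 1; omega)
            rw [hdd, pv_prefix1, List.getElem?_drop]
            simpa using hj2
          rw [pvASkipLine_no s i hno, show max i s.length = s.length from by omega, pvALoop,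
              dif_neg (by omega)]
        · rw [pvBGo_line_found (s.drop i) (s.drop i) hT hsw hnl]
          have hf0 : 0 ≤ PySem.Chars.find (s.drop i) ['\n'] := by
            have := PySem.Chars.neg_one_le_find (s.drop i) ['\n']; omega
          obtain ⟨hpre, hmin⟩ := PySem.Chars.find_spec hf0
          have hmge : 1 ≤ (PySem.Chars.find (s.drop i) ['\n']).toNat := by
            rcases Nat.eq_zero_or_pos (PySem.Chars.find (s.drop i) ['\n']).toNat with h0 | h0
            · exfalso
              rw [h0, List.drop_zero] at hpre
              have hx := (pv_prefix1 _ _).mp hpre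
              rw [hg0, hd.1] at hx
              exact absurd hx (by decide)
            · exact h0
          have hnlm : s[i + (PySem.Chars.find (s.drop i) ['\n']).toNat]? = some '\n' := by
            have hdd : (s.drop i).drop (PySem.Chars.find (s.drop i) ['\n']).toNat =
                s.drop (i + (PySem.Chars.find (s.drop i) ['\n']).toNat) := by
              rw [List.drop_drop]; try (congr 1; omega)
            have hx := (pv_prefix1 _ _).mp (hdd ▸ hpre)
            rw [List.getElem?_drop] at hx
            simpa using hx
          have hmin' : ∀ j, i ≤ j → j < i + (PySem.Chars.find (s.drop i) ['\n']).toNat →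
              s[j]? ≠ some '\n' := by
            intro j hj hjlt hcon
            apply hmin (j - i) (by omega)
            have hdd : (s.drop i).drop (j - i) = s.drop j := by
              rw [List.drop_drop]; try (congr 1; omega)
            rw [hdd, pv_prefix1, List.getElem?_drop]
            simpa using hcon
          rw [pvASkipLine_first s i (i + (PySem.Chars.find (s.drop i) ['\n']).toNat) (by omega)
                hnlm hmin']
          have harg : PySem.List.slice (s.drop i) (some (PySem.Chars.find (s.drop i) ['\n'])) none =
              s.drop (i + (PySem.Chars.find (s.drop i) ['\n']).toNat) := by
            rw [PySem.List.slice_from _ hf0, List.drop_drop]; try (congr 1; omega)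
          rw [harg]
          exact pv_main s (i + (PySem.Chars.find (s.drop i) ['\n']).toNat)
      · rw [dif_neg hd]
        have hs1 : PySem.Chars.startswith (s.drop i) ['-', '-'] = false := by
          cases hcase : PySem.Chars.startswith (s.drop i) ['-', '-'] with
          | false => rfl
          | true =>
            exfalso
            obtain ⟨ha, hb'⟩ := (pv_prefix2 _ _ _).mp ((PySem.Chars.startswith_iff _ _).mp hcase)
            rw [hg0] at ha
            rw [hg1] at hb'
            exact hd ⟨Option.some.inj ha, (List.getElem?_eq_some_iff.mp hb').1, hb'⟩
        by_cases hb : s[i] = '/' ∧ i + 1 < s.length ∧ s[i + 1]? = some '*'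
        · rw [dif_pos hb]
          have hsw2 : PySem.Chars.startswith (s.drop i) ['/', '*'] = true :=
            (PySem.Chars.startswith_iff _ _).mpr ((pv_prefix2 _ _ _).mpr
              ⟨by rw [hg0, hb.1], by rw [hg1]; exact hb.2.2⟩)
          have hk : (2 : Nat) ≤ (s.drop i).length := by
            rw [List.length_drop]; omega
          have hff := PySem.Chars.findFrom_natCast (s.drop i) ['*', '/'] 2 hk
          have hcast : ((2 : Nat) : Int) = (2 : Int) := rfl
          rw [hcast] at hff
          have hdd2 : (s.drop i).drop 2 = s.drop (i + 2) := by
            rw [List.drop_drop]; try (congr 1; omega)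
          rw [hdd2] at hff
          by_cases hgneg : PySem.Chars.find (s.drop (i + 2)) ['*', '/'] = -1
          · have hffv : PySem.Chars.findFrom (s.drop i) ['*', '/'] 2 none = -1 := by
              rw [hff, if_pos hgneg]
            rw [pvBGo_block_none (s.drop i) (s.drop i) hT hs1 hsw2 hffv]
            have hno : ∀ j, i + 2 ≤ j → ¬(s[j]? = some '*' ∧ s[j + 1]? = some '/') := by
              rintro j hj ⟨hA, hB⟩
              apply (pv_find_none _ _).mp hgneg (j - (i + 2))
              have hdd : (s.drop (i + 2)).drop (j - (i + 2)) = s.drop j := by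
                rw [List.drop_drop]; try (congr 1; omega)
              rw [hdd, pv_prefix2]
              constructor
              · rw [List.getElem?_drop]; simpa using hA
              · rw [List.getElem?_drop]; simpa using hB
            rw [pvASkipBlock_no s (i + 2) hno, pvALoop, dif_neg (by omega)]
          · have hg0' : 0 ≤ PySem.Chars.find (s.drop (i + 2)) ['*', '/'] := by
              have := PySem.Chars.neg_one_le_find (s.drop (i + 2)) ['*', '/']; omega
            obtain ⟨hpre, hmin⟩ := PySem.Chars.find_spec hg0'
            have hdd : (s.drop (i + 2)).drop (PySem.Chars.find (s.drop (i + 2)) ['*', '/']).toNat =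
                s.drop (i + 2 + (PySem.Chars.find (s.drop (i + 2)) ['*', '/']).toNat) := by
              rw [List.drop_drop]; try (congr 1; omega)
            obtain ⟨hA, hB⟩ := (pv_prefix2 _ _ _).mp (hdd ▸ hpre)
            rw [List.getElem?_drop] at hA
            rw [List.getElem?_drop] at hB
            have hmin' : ∀ j, i + 2 ≤ j →
                j < i + 2 + (PySem.Chars.find (s.drop (i + 2)) ['*', '/']).toNat →
                ¬(s[j]? = some '*' ∧ s[j + 1]? = some '/') := by
              rintro j hj hjlt ⟨hA', hB'⟩
              apply hmin (j - (i + 2)) (by omega)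
              have hdd' : (s.drop (i + 2)).drop (j - (i + 2)) = s.drop j := by
                rw [List.drop_drop]; try (congr 1; omega)
              rw [hdd', pv_prefix2]
              constructor
              · rw [List.getElem?_drop]; simpa using hA'
              · rw [List.getElem?_drop]; simpa using hB'
            rw [pvASkipBlock_first s (i + 2)
                  (i + 2 + (PySem.Chars.find (s.drop (i + 2)) ['*', '/']).toNat) (by omega)
                  (by simpa using hA) (by simpa using hB) hmin']
            have hffv : PySem.Chars.findFrom (s.drop i) ['*', '/'] 2 none =
                2 + PySem.Chars.find (s.drop (i + 2)) ['*', '/'] := by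
              rw [hff, if_neg hgneg]
            have hffne : PySem.Chars.findFrom (s.drop i) ['*', '/'] 2 none ≠ -1 := by
              rw [hffv]; omega
            rw [pvBGo_block_found (s.drop i) (s.drop i) hT hs1 hsw2 hffne]
            have harg : PySem.List.slice (s.drop i)
                (some (PySem.Chars.findFrom (s.drop i) ['*', '/'] 2 none + 2)) none =
                s.drop (i + (PySem.Chars.find (s.drop (i + 2)) ['*', '/']).toNat + 4) := by
              rw [hffv, PySem.List.slice_from _ (by omega), List.drop_drop]
              congr 1
              omega
            rw [harg, show i + 2 + (PySem.Chars.find (s.drop (i + 2)) ['*', '/']).toNat + 2 =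
                  i + (PySem.Chars.find (s.drop (i + 2)) ['*', '/']).toNat + 4 from by omega]
            exact pv_main s (i + (PySem.Chars.find (s.drop (i + 2)) ['*', '/']).toNat + 4)
        · rw [dif_neg hb]
          have hs2 : PySem.Chars.startswith (s.drop i) ['/', '*'] = false := by
            cases hcase : PySem.Chars.startswith (s.drop i) ['/', '*'] with
            | false => rfl
            | true =>
              exfalso
              obtain ⟨ha, hb'⟩ := (pv_prefix2 _ _ _).mp ((PySem.Chars.startswith_iff _ _).mp hcase)
              rw [hg0] at ha
              rw [hg1] at hb'
              exact hb ⟨Option.some.inj ha, (List.getElem?_eq_some_iff.mp hb').1, hb'⟩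
          rw [pvBGo_token (s.drop i) (s.drop i) hT hs1 hs2]
          have hsl : PySem.List.slice s (some (i : Int)) (some ((i : Int) + 6)) =
              PySem.List.slice (s.drop i) none (some 6) := by
            have hz1 : (0 : Int) ≤ (i : Int) := by omega
            have hz2 : (0 : Int) ≤ (i : Int) + 6 := by omega
            have hz6 : (0 : Int) ≤ (6 : Int) := by omega
            rw [PySem.List.slice_toNat s hz1 hz2, PySem.List.slice_to (s.drop i) hz6]
            have h6 : ((i : Int) + 6).toNat = i + 6 := by omega
            have hii : ((i : Int)).toNat = i := by omega
            rw [h6, hii, show (6 : Int).toNat = 6 from rfl, show i + 6 - i = 6 from by omega]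
          simp only [hsl]
  · rw [dif_neg hi, List.drop_eq_nil_of_le (by omega)]
    exact pvBGo_nil.symm
termination_by s.length - i
decreasing_by
  · omega
  · omega
  · omega

-- ===== VERDICT (by name: the statement is the Claim_ definition above) =====
theorem is_select_py_spec : Claim_equal_is_select_py := by
  intro sql _
  unfold Spec_is_select_py is_select_py is_select_py_alt
  simpa using pv_main sql.toList 0
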